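-- pv_equiv track=rewrite | github.com/iizs/programming-challanges | codeforces/1353/1353C.py | board_moves
-- ===== SOURCE A (Python) =====
-- def board_moves(size):
--     if size == 1:
--         return 0
--     sum = 0
--     prev = 1
--     prev_2 = prev * prev
--     for cur in range(3, size+1, 2):
--         q = cur // 2
--         cur_2 = cur * cur
--         sum += (cur_2 - prev_2) * q
--         prev_2 = cur_2
--     return sum
-- ===== SOURCE B (Python) =====
-- def board_moves(size):
--     # closed form: with m odd steps, the sum telescopes to 8*(1^2+...+m^2)
--     m = (size - 1) // 2
--     if m < 0:
--         m = 0
--     return 4 * m * (m + 1) * (2 * m + 1) // 3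
-- ===== Notes on version B (the rewrite author's own statement) =====
-- stated objective: faster
-- what changed: Replaced the O(size) loop over odd numbers by the closed-form formula 4*m*(m+1)*(2*m+1)/3 with m = max(0,(size-1)//2), since the loop body telescopes to 8*(1^2+...+m^2).
import Mathlib
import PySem

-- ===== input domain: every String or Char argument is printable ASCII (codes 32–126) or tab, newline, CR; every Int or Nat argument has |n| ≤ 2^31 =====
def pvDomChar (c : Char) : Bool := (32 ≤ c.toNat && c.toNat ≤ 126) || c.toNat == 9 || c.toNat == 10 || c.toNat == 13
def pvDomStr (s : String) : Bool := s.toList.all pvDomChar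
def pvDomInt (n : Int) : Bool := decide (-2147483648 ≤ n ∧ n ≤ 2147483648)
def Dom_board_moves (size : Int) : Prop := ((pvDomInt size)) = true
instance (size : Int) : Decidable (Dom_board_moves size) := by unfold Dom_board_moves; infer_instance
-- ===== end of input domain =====

-- B replaces A's O(size) loop over odd numbers by the closed-form formula
-- 4*m*(m+1)*(2*m+1)//3 with m = max(0,(size-1)//2)  (objective: faster, asymptotic).


-- ===== PORT A =====
def board_moves (size : Int) : Int :=
  if size = 1 then 0
  else
    let sum : Int := 0
    let prev : Int := 1
    let prev_2 := prev * prev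
    let r := (PySem.List.pyRange 3 (size + 1) 2).foldl
      (fun (st : Int × Int) cur =>
        let q := PySem.Int.floordiv cur 2
        let cur_2 := cur * cur
        (st.1 + (cur_2 - st.2) * q, cur_2)) (sum, prev_2)
    r.1

-- ===== PORT B =====
def board_moves_alt (size : Int) : Int :=
  let m := PySem.Int.floordiv (size - 1) 2
  let m := if m < 0 then 0 else m
  PySem.Int.floordiv (4 * m * (m + 1) * (2 * m + 1)) 3

-- ===== PRECONDITION & SPEC =====
def Spec_board_moves (size : Int) (out : Int) : Prop := out = board_moves_alt size
instance (size : Int) (out : Int) : Decidable (Spec_board_moves size out) := by unfold Spec_board_moves; infer_instance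

-- ===== CLAIM (what is proved, stated in full; the proofs are below) =====
def Claim_equal_board_moves : Prop := ∀ (size : Int), Dom_board_moves size → Spec_board_moves size (board_moves size)

-- ===== LEMMAS AND PROOFS =====

-- partial sums of A's loop: pvS m = 8 * (1^2 + ... + m^2)
def pvS : Nat → Int
  | 0 => 0
  | m + 1 => pvS m + 8 * ((m : Int) + 1) ^ 2

lemma pvS_eq (m : Nat) : 3 * pvS m = 4 * (m : Int) * ((m : Int) + 1) * (2 * (m : Int) + 1) := by
  induction m with
  | zero => simp [pvS]
  | succ n ih =>
      simp only [pvS]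
      push_cast
      push_cast at ih
      ring_nf
      ring_nf at ih
      omega

lemma loop_eval (m : Nat) :
    ((List.range m).map (fun k : Nat => (3 : Int) + 2 * (k : Int))).foldl
      (fun (st : Int × Int) cur =>
        (st.1 + (cur * cur - st.2) * PySem.Int.floordiv cur 2, cur * cur)) ((0 : Int), (1 : Int))
    = (pvS m, (2 * (m : Int) + 1) * (2 * (m : Int) + 1)) := by
  induction m with
  | zero => simp [pvS]
  | succ n ih =>
      rw [List.range_succ, List.map_append, List.foldl_append, ih]
      have hq : PySem.Int.floordiv (3 + 2 * (n : Int)) 2 = (n : Int) + 1 := by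
        rw [PySem.Int.floordiv, Int.fdiv_eq_ediv]; simp; omega
      simp only [List.map, List.foldl, hq, pvS, Prod.mk.injEq]
      constructor
      · ring
      · push_cast; ring

lemma fdiv_two_eq (a : Int) : PySem.Int.floordiv a 2 = a / 2 := by
  rw [PySem.Int.floordiv, Int.fdiv_eq_ediv]; simp

lemma fdiv_three_mul (c : Int) : PySem.Int.floordiv (3 * c) 3 = c := by
  rw [PySem.Int.floordiv, Int.fdiv_eq_ediv]
  simp [Int.mul_ediv_cancel_left c (by norm_num : (3:Int) ≠ 0)]

-- ===== VERDICT (by name: the statement is the Claim_ definition above) =====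
theorem board_moves_spec : Claim_equal_board_moves := by
  intro size _
  unfold Spec_board_moves board_moves board_moves_alt
  dsimp only
  simp only [one_mul]
  by_cases h3 : 3 ≤ size
  · -- the loop runs; closed form via loop_eval
    rw [if_neg (by omega : ¬ size = 1)]
    rw [PySem.List.pyRange_of_pos _ _ (by norm_num)]
    rw [if_pos (by omega : (3 : Int) < size + 1)]
    have hcnt : size + 1 - 3 + 2 - 1 = size - 1 := by ring
    rw [hcnt, loop_eval]
    have hm : ((((size - 1) / 2).toNat : Int)) = (size - 1) / 2 := by omega
    rw [fdiv_two_eq]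
    rw [if_neg (by omega : ¬ (size - 1) / 2 < 0)]
    rw [← hm, ← pvS_eq, fdiv_three_mul]
    simp only [Int.toNat_natCast]
  · -- loop is empty, both sides are 0
    rw [PySem.List.pyRange_of_pos _ _ (by norm_num)]
    rw [if_neg (by omega : ¬ (3 : Int) < size + 1)]
    rw [fdiv_two_eq]
    by_cases h1 : size = 1
    · subst h1; norm_num [PySem.Int.floordiv]
    · rw [if_neg h1]
      simp only [List.range_zero, List.map_nil, List.foldl_nil]
      by_cases hlt : (size - 1) / 2 < 0
      · rw [if_pos hlt]; norm_num [PySem.Int.floordiv]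
      · have h0 : (size - 1) / 2 = 0 := by omega
        rw [if_neg hlt, h0]; norm_num [PySem.Int.floordiv]
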